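-- pv_equiv track=rewrite | github.com/clockwork72/RQ1 | code/pipeline/patterns.py | _is_third_party_actor_description
-- ===== SOURCE A (Python) =====
-- def _is_third_party_actor_description(source_text: str) -> bool:
--     """Detect descriptions of what a THIRD-PARTY actor does (not the website)."""
--     text = source_text.lower()
--     return any(phrase in text for phrase in (
--         "your telecom operator",
--         "your internet service provider",
--         "your isp ",
--         "the telecom operator",
--         "the mobile operator",
--         "the network operator",
--     ))
-- ===== SOURCE B (Python) =====
-- _PHRASES = (
--     "your telecom operator",
--     "your internet service provider",
--     "your isp ",
--     "the telecom operator",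
--     "the mobile operator",
--     "the network operator",
-- )
--
--
-- def _is_third_party_actor_description(source_text: str) -> bool:
--     """Single left-to-right scan: at each position test whether any phrase starts there."""
--     text = source_text.lower()
--     return any(
--         text.startswith(phrase, i)
--         for i in range(len(text))
--         for phrase in _PHRASES
--     )
-- ===== Notes on version B (the rewrite author's own statement) =====
-- stated objective: alternative
-- what changed: Replaces six independent full substring membership scans by a single left-to-right scan over the lowered text that, at each position, tests whether any of the six phrases starts there via startswith with a start offset.
import Mathlib
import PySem

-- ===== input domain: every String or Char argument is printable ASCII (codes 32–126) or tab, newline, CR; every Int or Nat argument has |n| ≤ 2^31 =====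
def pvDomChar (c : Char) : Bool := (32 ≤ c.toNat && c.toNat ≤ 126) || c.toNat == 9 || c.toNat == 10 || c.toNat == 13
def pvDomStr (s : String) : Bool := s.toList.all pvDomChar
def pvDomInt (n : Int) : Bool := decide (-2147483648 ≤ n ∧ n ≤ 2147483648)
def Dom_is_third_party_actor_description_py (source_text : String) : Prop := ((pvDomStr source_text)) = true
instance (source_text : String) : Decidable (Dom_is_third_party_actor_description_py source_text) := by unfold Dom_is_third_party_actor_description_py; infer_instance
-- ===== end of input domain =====

-- B replaces six independent substring scans by one left-to-right scan testing each phrase at each position (alternative; not measured faster).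

-- the six phrases, shared verbatim by both programs
def pvPhrases : List String :=
  [ "your telecom operator",
    "your internet service provider",
    "your isp ",
    "the telecom operator",
    "the mobile operator",
    "the network operator" ]

-- ===== PORT A =====
-- text = source_text.lower(); any(phrase in text for phrase in (...))
def is_third_party_actor_description_py (source_text : String) : Bool :=
  let text := PySem.Str.lower source_text
  pvPhrases.any (fun phrase => PySem.Str.isIn phrase text)

-- ===== PORT B =====
-- text = source_text.lower(); any(text.startswith(phrase, i) for i in range(len(text)) for phrase in _PHRASES)
def is_third_party_actor_description_py_alt (source_text : String) : Bool :=
  let text := (PySem.Str.lower source_text).toList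
  (List.range text.length).any (fun i =>
    pvPhrases.any (fun phrase => PySem.Chars.startswith (text.drop i) phrase.toList))

-- ===== PRECONDITION & SPEC =====
def Spec_is_third_party_actor_description_py (source_text : String) (out : Bool) : Prop := out = is_third_party_actor_description_py_alt source_text
instance (source_text : String) (out : Bool) : Decidable (Spec_is_third_party_actor_description_py source_text out) := by unfold Spec_is_third_party_actor_description_py; infer_instance

-- ===== CLAIM (what is proved, stated in full; the proofs are below) =====
def Claim_equal_is_third_party_actor_description_py : Prop := ∀ (source_text : String), Dom_is_third_party_actor_description_py source_text → Spec_is_third_party_actor_description_py source_text (is_third_party_actor_description_py source_text)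

-- ===== LEMMAS AND PROOFS =====

-- 'sub in t' agrees with 'some position i < |t| where sub starts', for nonempty sub
theorem isIn_eq_any_range (t sub : List Char) (hsub : sub ≠ []) :
    PySem.Chars.isIn sub t = (List.range t.length).any (fun i => PySem.Chars.startswith (t.drop i) sub) := by
  rcases h : (List.range t.length).any (fun i => PySem.Chars.startswith (t.drop i) sub) with _ | _
  · -- RHS false: no position works, so sub is not in t
    rw [List.any_eq_false] at h
    rw [PySem.Chars.isIn_eq_false_iff]
    intro hinf
    obtain ⟨j, hj⟩ := (PySem.Chars.exists_prefix_drop_iff_isIn sub t).symm.mp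
      ((PySem.Chars.isIn_iff_infix sub t).mpr hinf)
    by_cases hjl : j < t.length
    · exact absurd ((PySem.Chars.startswith_iff _ _).mpr hj)
        (by simpa using h j (List.mem_range.mpr hjl))
    · have : t.drop j = [] := List.drop_eq_nil_of_le (by omega)
      rw [this] at hj
      exact hsub (List.prefix_nil.mp hj)
  · -- RHS true: some position works, so sub is in t
    rw [List.any_eq_true] at h
    obtain ⟨i, _, hi⟩ := h
    exact (PySem.Chars.exists_prefix_drop_iff_isIn sub t).mp
      ⟨i, (PySem.Chars.startswith_iff _ _).mp hi⟩

-- ===== VERDICT (by name: the statement is the Claim_ definition above) =====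
theorem is_third_party_actor_description_py_spec : Claim_equal_is_third_party_actor_description_py := by
  intro s _
  unfold Spec_is_third_party_actor_description_py
  unfold is_third_party_actor_description_py is_third_party_actor_description_py_alt
  simp only [PySem.Str.isIn_eq]
  set t := (PySem.Str.lower s).toList with ht
  rcases h : pvPhrases.any (fun phrase => PySem.Chars.isIn phrase.toList t) with _ | _
  · rw [List.any_eq_false] at h
    symm; rw [List.any_eq_false]
    intro i hi
    rw [Bool.not_eq_true, List.any_eq_false]
    intro p hp
    have := h p hp
    rw [Bool.not_eq_true, isIn_eq_any_range t p.toList (by fin_cases hp <;> decide)] at this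
    rw [List.any_eq_false] at this
    simpa using this i hi
  · rw [List.any_eq_true] at h
    obtain ⟨p, hp, hin⟩ := h
    rw [isIn_eq_any_range t p.toList (by fin_cases hp <;> decide), List.any_eq_true] at hin
    obtain ⟨i, hi, hsw⟩ := hin
    symm; rw [List.any_eq_true]
    exact ⟨i, hi, List.any_eq_true.mpr ⟨p, hp, hsw⟩⟩
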